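-- pv_equiv track=rewrite | github.com/Leapense/problems | 4905번: Think I'll Buy Me a Football Team/solution.py | solve
-- ===== SOURCE A (Python) =====
-- def solve(nums : list[int]) -> list[str]:
--     out, idx, tc = [], 0, 1
--     while True:
--         n = nums[idx]
--         idx += 1
--         if n == 0:
--             break
--
--         balance = [0] * n
--         before = 0
--
--         for i in range(n):
--             for j in range(n):
--                 val = nums[idx]
--                 idx += 1
--                 before += val
--                 balance[i] -= val
--                 balance[j] += val
--
--         after = sum(b for b in balance if b > 0)
--         out.append(f"{tc}. {before} {after}")
--         tc += 1
--
--     return out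
-- ===== SOURCE B (Python) =====
-- def solve(nums: list[int]) -> list[str]:
--     out, idx, tc = [], 0, 1
--     while True:
--         n = nums[idx]
--         idx += 1
--         if n == 0:
--             break
--         block = nums[idx:idx + n * n]
--         idx += n * n
--         before = sum(block)
--         rowsum = [sum(block[i * n:(i + 1) * n]) for i in range(n)]
--         colsum = [sum(block[i * n + k] for i in range(n)) for k in range(n)]
--         after = sum(c - r for c, r in zip(colsum, rowsum) if c - r > 0)
--         out.append(f"{tc}. {before} {after}")
--         tc += 1
--     return out
-- ===== Notes on version B (the rewrite author's own statement) =====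
-- stated objective: idiomatic
-- what changed: B slices each test case into a flat block and computes before/row-sums/column-sums with comprehensions and a zip over (colsum, rowsum) differences, instead of A's mutable balance array updated inside a nested index loop.
-- outside the precondition, e.g. on solve([-1, 0]): A returns ['1. 0 0'], B raises IndexError
import Mathlib
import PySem

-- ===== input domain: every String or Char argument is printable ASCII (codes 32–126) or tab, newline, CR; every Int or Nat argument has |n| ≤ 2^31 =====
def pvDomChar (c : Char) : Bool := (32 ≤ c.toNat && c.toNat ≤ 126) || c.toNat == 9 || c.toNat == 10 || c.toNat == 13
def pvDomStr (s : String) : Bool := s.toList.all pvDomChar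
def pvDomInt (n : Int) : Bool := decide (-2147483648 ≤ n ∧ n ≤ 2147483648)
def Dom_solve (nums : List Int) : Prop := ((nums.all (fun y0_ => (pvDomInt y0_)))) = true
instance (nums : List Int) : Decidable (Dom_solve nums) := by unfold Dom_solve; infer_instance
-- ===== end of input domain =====

-- B replaces A's mutated balance array and nested index loop by slicing each test case
-- into a flat block and summing rows/columns with comprehensions (idiomatic decomposition;
-- same asymptotic cost). Equivalence is claimed on well-formed inputs (Pre_solve).

-- ===== PORT A =====
-- one step of A's innermost loop body: read val = nums[idx]; idx += 1; before += val;
-- balance[i] -= val; balance[j] += val.  (nums.getD is exact for the in-range reads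
-- Pre_solve guarantees; the out-of-range case is excluded by Pre_solve.)
def solveInnerStep (nums : List Int) (i j : Nat) (s : Nat × Int × List Int) : Nat × Int × List Int :=
  let val := nums.getD s.1 0
  let bal1 := s.2.2.set i (s.2.2.getD i 0 - val)
  (s.1 + 1, s.2.1 + val, bal1.set j (bal1.getD j 0 + val))

-- A's double 'for i in range(n): for j in range(n)' over the state (idx, before, balance)
def solveInner (nums : List Int) (n : Nat) (s : Nat × Int × List Int) : Nat × Int × List Int :=
  (List.range n).foldl (fun s i => (List.range n).foldl (fun s j => solveInnerStep nums i j s) s) s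

-- termination helpers for solveLoop (cited by decreasing_by)
lemma jfold_fst (nums : List Int) (i : Nat) (l : List Nat) (s : Nat × Int × List Int) :
    (l.foldl (fun s j => solveInnerStep nums i j s) s).1 = s.1 + l.length := by
  induction l generalizing s with
  | nil => simp
  | cons a t ih =>
    simp only [List.foldl_cons]
    rw [ih]
    simp only [solveInnerStep, List.length_cons]
    omega

lemma solveInner_fst (nums : List Int) (n : Nat) (s : Nat × Int × List Int) :
    (solveInner nums n s).1 = s.1 + n * n := by
  unfold solveInner
  have h : ∀ (l : List Nat) (s : Nat × Int × List Int),
      (l.foldl (fun s i => (List.range n).foldl (fun s j => solveInnerStep nums i j s) s) s).1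
        = s.1 + l.length * n := by
    intro l
    induction l with
    | nil => intro s; simp
    | cons a t ih =>
      intro s
      simp only [List.foldl_cons, ih, jfold_fst, List.length_range, List.length_cons]
      ring
  simp [h, List.length_range]

-- A's outer 'while True' loop; the 'nums.length ≤ idx' guard totalizes the read nums[idx]
-- (Python raises IndexError there; such inputs are excluded by Pre_solve)
def solveLoop (nums : List Int) (idx : Nat) (tc : Int) (out : List String) : List String :=
  if nums.length ≤ idx then out
  else
    let n := nums.getD idx 0
    if n = 0 then out
    else
      let r := solveInner nums n.toNat (idx + 1, 0, List.replicate n.toNat 0)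
      let after := r.2.2.foldl (fun a b => if b > 0 then a + b else a) 0
      solveLoop nums r.1 (tc + 1)
        (out ++ [PySem.Int.toStr tc ++ ". " ++ PySem.Int.toStr r.2.1 ++ " " ++ PySem.Int.toStr after])
termination_by nums.length - idx
decreasing_by
  have := solveInner_fst nums (nums.getD idx 0).toNat (idx + 1, 0, List.replicate (nums.getD idx 0).toNat 0)
  simp only [this]
  omega

def solve (nums : List Int) : List String := solveLoop nums 0 1 []

-- ===== PORT B =====
-- B's 'while True' loop: slice the n*n block (nums[idx:idx+n*n] = drop/take, exact for the
-- nonnegative in-range bounds Pre_solve guarantees), then before/rowsum/colsum/after by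
-- comprehensions; the same totalizing guard as in A's port covers the read nums[idx].
def solveAltLoop (nums : List Int) (idx : Nat) (tc : Int) (out : List String) : List String :=
  if nums.length ≤ idx then out
  else
    let n := nums.getD idx 0
    if n = 0 then out
    else
      let m := n.toNat
      let block := (nums.drop (idx + 1)).take (m * m)
      let before := block.sum
      let rowsum := (List.range m).map (fun i => ((block.drop (i * m)).take m).sum)
      let colsum := (List.range m).map (fun k => ((List.range m).map (fun i => block.getD (i * m + k) 0)).sum)
      let after := (colsum.zip rowsum).foldl (fun a cr => if cr.1 - cr.2 > 0 then a + (cr.1 - cr.2) else a) 0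
      solveAltLoop nums (idx + 1 + m * m) (tc + 1)
        (out ++ [PySem.Int.toStr tc ++ ". " ++ PySem.Int.toStr before ++ " " ++ PySem.Int.toStr after])
termination_by nums.length - idx

def solve_alt (nums : List Int) : List String := solveAltLoop nums 0 1 []

-- ===== PRECONDITION & SPEC =====
-- Pre_solve: the input is a sequence of test cases, each a header n > 0 followed by at
-- least n*n entries, terminated by a header 0 (anything may follow the terminator).
-- It excludes truncated input and a missing terminator (A raises IndexError there) and
-- negative headers, which are malformed input outside the task's natural domain (A happens
-- to return a "tc. 0 0" line for them, an artefact of 'range(n)' being empty).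
-- wfBlocks k l: skip the k remaining entries of the current block, then expect
-- a header (0 terminates; n > 0 starts a block of n*n entries)
def wfBlocks : Nat → List Int → Bool
  | _, [] => false
  | 0, n :: rest => if n = 0 then true else if 0 < n then wfBlocks (n * n).toNat rest else false
  | k + 1, _ :: rest => wfBlocks k rest

def Pre_solve (nums : List Int) : Prop := wfBlocks 0 nums = true
instance (nums : List Int) : Decidable (Pre_solve nums) := by unfold Pre_solve; infer_instance

def pvWitness_solve : List Int := [1, 5, 0]

def Spec_solve (nums : List Int) (out : List String) : Prop := out = solve_alt nums
instance (nums : List Int) (out : List String) : Decidable (Spec_solve nums out) := by unfold Spec_solve; infer_instance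

-- ===== CLAIM (what is proved, stated in full; the proofs are below) =====
def Claim_equal_solve : Prop := ∀ (nums : List Int), Dom_solve nums → Pre_solve nums → Spec_solve nums (solve nums)

-- ===== LEMMAS AND PROOFS =====

lemma getD_set_self (l : List Int) (j : Nat) (x : Int) (h : j < l.length) :
    (l.set j x).getD j 0 = x := by simp [List.getD_eq_getElem?_getD, List.getElem?_set, h]
lemma getD_set_ne (l : List Int) (j k : Nat) (x : Int) (h : k ≠ j) :
    (l.set j x).getD k 0 = l.getD k 0 := by simp [List.getD_eq_getElem?_getD, List.getElem?_set, Ne.symm h]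

lemma jfold_spec (nums : List Int) (i n : Nat) (hi : i < n) (j : Nat) (hj : j ≤ n)
    (pos : Nat) (bef : Int) (bal : List Int) (hlen : bal.length = n) :
    ((List.range j).foldl (fun s j' => solveInnerStep nums i j' s) (pos, bef, bal)).1 = pos + j ∧
    ((List.range j).foldl (fun s j' => solveInnerStep nums i j' s) (pos, bef, bal)).2.1
      = bef + ((List.range j).map (fun t => nums.getD (pos + t) 0)).sum ∧
    ((List.range j).foldl (fun s j' => solveInnerStep nums i j' s) (pos, bef, bal)).2.2.length = n ∧
    ∀ k, k < n → ((List.range j).foldl (fun s j' => solveInnerStep nums i j' s) (pos, bef, bal)).2.2.getD k 0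
      = bal.getD k 0 + (if k < j then nums.getD (pos + k) 0 else 0)
        - (if k = i then ((List.range j).map (fun t => nums.getD (pos + t) 0)).sum else 0) := by
  induction j with
  | zero => simp [hlen]
  | succ j ih =>
    obtain ⟨h1, h2, h3, h4⟩ := ih (by omega)
    rw [List.range_succ]
    simp only [List.foldl_append, List.foldl_cons, List.foldl_nil]
    set s' := ((List.range j).foldl (fun s j' => solveInnerStep nums i j' s) (pos, bef, bal)) with hs'
    have hj' : j < n := by omega
    have hval : nums.getD s'.1 0 = nums.getD (pos + j) 0 := by rw [h1]
    refine ⟨?_, ?_, ?_, ?_⟩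
    · simp [solveInnerStep, h1]; omega
    · simp only [solveInnerStep, hval, h2, List.range_succ, List.map_append, List.sum_append,
        List.map_cons, List.sum_cons, List.map_nil, List.sum_nil]
      ring
    · simp [solveInnerStep, h3]
    · intro k hk
      have hS : ((List.range j ++ [j]).map (fun t => nums.getD (pos + t) 0)).sum
          = ((List.range j).map (fun t => nums.getD (pos + t) 0)).sum + nums.getD (pos + j) 0 := by
        simp
      simp only [solveInnerStep, h1]
      -- bal1 := s'.2.2.set i (s'.2.2.getD i 0 - val);  result := bal1.set j (bal1.getD j 0 + val)
      by_cases hkj : k = j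
      · subst hkj
        rw [getD_set_self _ _ _ (by simp [h3]; omega)]
        by_cases hki : k = i
        · subst hki
          rw [getD_set_self _ _ _ (by simp [h3]; omega)]
          rw [hS, h4 k hk]
          split_ifs <;> omega
        · rw [getD_set_ne _ _ _ _ hki]
          rw [hS, h4 k hk]
          split_ifs <;> omega
      · rw [getD_set_ne _ _ _ _ hkj]
        have hklt : (k < j + 1) = (k < j) := by
          apply propext; omega
        by_cases hki : k = i
        · subst hki
          rw [getD_set_self _ _ _ (by simp [h3]; omega)]
          rw [hS, h4 k hk]
          split_ifs <;> omega
        · rw [getD_set_ne _ _ _ _ hki]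
          rw [hS, h4 k hk]
          split_ifs <;> omega

lemma ifold_spec (nums : List Int) (n base : Nat) (i : Nat) (hi : i ≤ n) :
    ((List.range i).foldl (fun s i' => (List.range n).foldl (fun s j => solveInnerStep nums i' j s) s)
        (base, 0, List.replicate n 0)).1 = base + i * n ∧
    ((List.range i).foldl (fun s i' => (List.range n).foldl (fun s j => solveInnerStep nums i' j s) s)
        (base, 0, List.replicate n 0)).2.1
      = ((List.range (i * n)).map (fun t => nums.getD (base + t) 0)).sum ∧
    ((List.range i).foldl (fun s i' => (List.range n).foldl (fun s j => solveInnerStep nums i' j s) s)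
        (base, 0, List.replicate n 0)).2.2.length = n ∧
    ∀ k, k < n → ((List.range i).foldl (fun s i' => (List.range n).foldl (fun s j => solveInnerStep nums i' j s) s)
        (base, 0, List.replicate n 0)).2.2.getD k 0
      = ((List.range i).map (fun r => nums.getD (base + r * n + k) 0)).sum
        - (if k < i then ((List.range n).map (fun t => nums.getD (base + k * n + t) 0)).sum else 0) := by
  induction i with
  | zero => simp
  | succ i ih =>
    obtain ⟨h1, h2, h3, h4⟩ := ih (by omega)
    rw [List.range_succ]
    simp only [List.foldl_append, List.foldl_cons, List.foldl_nil]
    set s' := ((List.range i).foldl (fun s i' => (List.range n).foldl (fun s j => solveInnerStep nums i' j s) s)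
        (base, 0, List.replicate n 0)) with hs'
    have hin : i < n := by omega
    have hpair : ((s'.1, (s'.2.1, s'.2.2)) : Nat × Int × List Int) = s' := rfl
    obtain ⟨g1, g2, g3, g4⟩ := jfold_spec nums i n hin n (le_refl n) s'.1 s'.2.1 s'.2.2 h3
    rw [hpair] at g1 g2 g3 g4
    have hsplit : ((List.range ((i+1) * n)).map (fun t => nums.getD (base + t) 0)).sum
        = ((List.range (i*n)).map (fun t => nums.getD (base + t) 0)).sum
          + ((List.range n).map (fun t => nums.getD (base + i*n + t) 0)).sum := by
      rw [Nat.succ_mul, List.range_add, List.map_append, List.sum_append, List.map_map]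
      congr 2
      exact List.map_congr_left (fun t _ => by simp [Nat.add_assoc])
    refine ⟨?_, ?_, g3, ?_⟩
    · rw [g1, h1, Nat.succ_mul]; omega
    · rw [hsplit, g2, h2, h1]
    · intro k hk
      have hcs : ((List.range i ++ [i]).map (fun r => nums.getD (base + r * n + k) 0)).sum
          = ((List.range i).map (fun r => nums.getD (base + r * n + k) 0)).sum
            + nums.getD (base + i * n + k) 0 := by
        simp
      rw [g4 k hk, h4 k hk, h1, hcs]
      by_cases hki : k = i
      · subst hki
        split_ifs <;> omega
      · split_ifs <;> omega

lemma slice_map (l : List Int) (a c : Nat) (h : a + c ≤ l.length) :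
    (l.drop a).take c = (List.range c).map (fun t => l.getD (a + t) 0) := by
  apply List.ext_getElem
  · simp; omega
  · intro t h1 h2
    have ht : t < c := by simpa using h2
    have hat : a + t < l.length := by omega
    simp [List.getElem_take, List.getElem_drop, List.getD_eq_getElem?_getD,
      List.getElem?_eq_getElem hat]

lemma getD_range_map (f : Nat → Int) (c t : Nat) (ht : t < c) :
    ((List.range c).map f).getD t 0 = f t := by
  simp [List.getD_eq_getElem?_getD, List.getElem?_eq_getElem, ht]

lemma wfBlocks_eq_drop : ∀ (k : Nat) (l : List Int), wfBlocks k l = wfBlocks 0 (l.drop k) := by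
  intro k
  induction k with
  | zero => intro l; simp
  | succ k ih =>
    intro l
    cases l with
    | nil => simp [wfBlocks]
    | cons x rest => simp [wfBlocks, ih]

theorem loop_eq (nums : List Int) (idx : Nat) (tc : Int) (out : List String)
    (hwf : wfBlocks 0 (nums.drop idx) = true) :
    solveLoop nums idx tc out = solveAltLoop nums idx tc out := by
  have hne : nums.drop idx ≠ [] := by
    intro h; rw [h] at hwf; simp [wfBlocks] at hwf
  have hidx : idx < nums.length := by
    by_contra h
    exact hne (List.drop_eq_nil_of_le (by omega))
  obtain ⟨n, rest, hdr⟩ := List.exists_cons_of_ne_nil hne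
  have hgetn : nums.getD idx 0 = n := by
    have h0 : nums[idx]? = some n := by
      have h := congrArg (fun l => l[0]?) hdr
      simpa [List.getElem?_drop] using h
    simp [List.getD_eq_getElem?_getD, h0]
  have hrest : nums.drop (idx + 1) = rest := by
    have : (nums.drop idx).drop 1 = nums.drop (idx + 1) := by
      rw [List.drop_drop]
    rw [← this, hdr]
    simp
  rw [solveLoop, solveAltLoop]
  rw [if_neg (by omega : ¬ nums.length ≤ idx), if_neg (by omega : ¬ nums.length ≤ idx)]
  simp only [hgetn]
  by_cases hn0 : n = 0
  · rw [if_pos hn0, if_pos hn0]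
  · rw [if_neg hn0, if_neg hn0]
    rw [hdr] at hwf
    rw [wfBlocks] at hwf
    rw [if_neg hn0] at hwf
    have hcond : 0 < n ∧ wfBlocks (n * n).toNat rest = true := by
      by_cases hc : 0 < n
      · rw [if_pos hc] at hwf; exact ⟨hc, hwf⟩
      · rw [if_neg hc] at hwf; exact absurd hwf (by simp)
    obtain ⟨hpos, hwf'⟩ := hcond
    rw [wfBlocks_eq_drop] at hwf'
    -- notation
    have hm : n = ((n.toNat : Nat) : Int) := (Int.toNat_of_nonneg hpos.le).symm
    have hnn : (n * n).toNat = n.toNat * n.toNat := by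
      rw [hm]
      exact_mod_cast rfl
    rw [hnn] at hwf'
    set m := n.toNat with hmdef
    set base := idx + 1 with hbase
    have hdropne : rest.drop (m * m) ≠ [] := by
      intro h; rw [h] at hwf'; simp [wfBlocks] at hwf'
    have hlen : m * m ≤ rest.length := by
      by_contra h
      exact hdropne (List.drop_eq_nil_of_le (by omega))
    have hrestlen : rest.length = nums.length - base := by
      rw [← hrest]; simp
    have hbound : base + m * m ≤ nums.length := by omega
    -- the block read by B
    have hblock : (nums.drop base).take (m * m)
        = (List.range (m * m)).map (fun t => nums.getD (base + t) 0) :=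
      slice_map nums base (m * m) hbound
    -- A's inner double loop, fully characterised
    obtain ⟨a1, a2, a3, a4⟩ := ifold_spec nums m base m (le_refl m)
    set r := solveInner nums m (base, 0, List.replicate m 0) with hrdef
    have hr1 : r.1 = base + m * m := by rw [hrdef]; unfold solveInner; exact a1
    have hr2 : r.2.1 = ((List.range (m * m)).map (fun t => nums.getD (base + t) 0)).sum := by
      rw [hrdef]; unfold solveInner; exact a2
    -- B's pieces
    have hcol : ((List.range m).map (fun k => ((List.range m).map
          (fun i => ((nums.drop base).take (m * m)).getD (i * m + k) 0)).sum))
        = (List.range m).map (fun k => ((List.range m).map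
          (fun i => nums.getD (base + i * m + k) 0)).sum) := by
      apply List.map_congr_left
      intro k hk
      rw [List.mem_range] at hk
      congr 1
      apply List.map_congr_left
      intro i hi
      rw [List.mem_range] at hi
      have him : i * m + k < m * m := by
        calc i * m + k < i * m + m := by omega
        _ = (i + 1) * m := by ring
        _ ≤ m * m := Nat.mul_le_mul_right m hi
      rw [hblock, getD_range_map _ _ _ him]
      congr 1
      omega
    have hrow : ((List.range m).map (fun i => (((nums.drop base).take (m * m)).drop (i * m)).take m |>.sum))
        = (List.range m).map (fun i => ((List.range m).map
          (fun t => nums.getD (base + i * m + t) 0)).sum) := by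
      apply List.map_congr_left
      intro i hi
      rw [List.mem_range] at hi
      have hib : i * m + m ≤ ((nums.drop base).take (m * m)).length := by
        have : ((nums.drop base).take (m * m)).length = m * m := by
          simp; omega
        rw [this]
        calc i * m + m = (i + 1) * m := by ring
        _ ≤ m * m := Nat.mul_le_mul_right m hi
      rw [slice_map _ _ _ hib]
      congr 1
      apply List.map_congr_left
      intro t ht
      rw [List.mem_range] at ht
      have : i * m + t < m * m := by
        calc i * m + t < i * m + m := by omega
        _ = (i + 1) * m := by ring
        _ ≤ m * m := Nat.mul_le_mul_right m hi
      rw [hblock, getD_range_map _ _ _ this]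
      congr 1
      omega
    -- A's balance list equals the column-minus-row list
    have hbal : r.2.2 = (List.range m).map (fun k =>
        ((List.range m).map (fun i => nums.getD (base + i * m + k) 0)).sum
          - ((List.range m).map (fun t => nums.getD (base + k * m + t) 0)).sum) := by
      apply List.ext_getElem
      · rw [hrdef]; unfold solveInner
        simp [a3]
      · intro k h1 h2
        have hkm : k < m := by simpa using h2
        have hgd : r.2.2.getD k 0 = r.2.2[k]'h1 := by
          simp [List.getD_eq_getElem?_getD, List.getElem?_eq_getElem h1]
        rw [← hgd]
        have := a4 k hkm
        rw [hrdef]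
        unfold solveInner
        rw [this, if_pos hkm]
        simp [List.getElem_map, List.getElem_range]
    -- equal "after" values
    have hafter : r.2.2.foldl (fun a b => if b > 0 then a + b else a) 0
        = ((((List.range m).map (fun k => ((List.range m).map
              (fun i => nums.getD (base + i * m + k) 0)).sum)).zip
            ((List.range m).map (fun k => ((List.range m).map
              (fun t => nums.getD (base + k * m + t) 0)).sum))).foldl
          (fun a cr => if cr.1 - cr.2 > 0 then a + (cr.1 - cr.2) else a) 0) := by
      rw [hbal, List.zip_map', List.foldl_map, List.foldl_map]
    -- assemble
    rw [hcol, hrow] at *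
    rw [hr1, hr2, hblock, hafter, hcol, hrow]
    have hwf2 : wfBlocks 0 (nums.drop (base + m * m)) = true := by
      rw [← hrest, List.drop_drop] at hwf'
      simpa [Nat.add_comm] using hwf'
    exact loop_eq nums (base + m * m) (tc + 1) _ hwf2
termination_by nums.length - idx
decreasing_by omega

-- ===== VERDICT (by name: the statement is the Claim_ definition above) =====
theorem solve_spec : Claim_equal_solve := by
  intro nums _ hpre
  unfold Spec_solve solve solve_alt
  exact loop_eq nums 0 1 [] (by simpa using hpre)
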